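-- pv_equiv track=rewrite | github.com/le-eug/MATH3411 | test3/q9/strong_pseudo_prime.py | is_strong_pseudoprime
-- ===== SOURCE A (Python) =====
-- def is_prime(n):
--     return True if len([i for i in range(2,n) if n % i == 0]) == 0 else False
--
-- def is_strong_pseudoprime(n, a):
--     if n < 2:
--         return False
--     if is_prime(n):
--         return False
--
--     # write n - 1 as 2^s * t with t odd
--     t = n - 1
--     s = 0
--     while t % 2 == 0:
--         t //= 2
--         s += 1
--
--     if pow(a, t, n) == 1:
--         return True
--
--     for r in range(s):
--         if pow(a, t*2**r, n) == n - 1: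
--             return True
--
--     return False
-- ===== SOURCE B (Python) =====
-- def is_prime(n):
--     if n < 2:
--         return False
--     i = 2
--     while i * i <= n:
--         if n % i == 0:
--             return False
--         i += 1
--     return True
--
-- def is_strong_pseudoprime(n, a):
--     if n < 2:
--         return False
--     if is_prime(n):
--         return False
--
--     # write n - 1 as 2^s * t with t odd
--     t = n - 1
--     s = 0
--     while t % 2 == 0:
--         t //= 2
--         s += 1
--
--     # single pass of repeated squaring instead of one pow() per r
--     x = pow(a, t, n)
--     if x == 1:
--         return True
--     for _ in range(s):
--         if x == n - 1:
--             return True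
--         x = x * x % n
--     return False
-- ===== Notes on version B (the rewrite author's own statement) =====
-- stated objective: faster
-- what changed: Primality is tested by trial division only up to sqrt(n) instead of scanning every i in [2,n), and the witness loop keeps one running square x (x = x*x % n) instead of recomputing pow(a, t*2**r, n) from scratch for each r.
import Mathlib
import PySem

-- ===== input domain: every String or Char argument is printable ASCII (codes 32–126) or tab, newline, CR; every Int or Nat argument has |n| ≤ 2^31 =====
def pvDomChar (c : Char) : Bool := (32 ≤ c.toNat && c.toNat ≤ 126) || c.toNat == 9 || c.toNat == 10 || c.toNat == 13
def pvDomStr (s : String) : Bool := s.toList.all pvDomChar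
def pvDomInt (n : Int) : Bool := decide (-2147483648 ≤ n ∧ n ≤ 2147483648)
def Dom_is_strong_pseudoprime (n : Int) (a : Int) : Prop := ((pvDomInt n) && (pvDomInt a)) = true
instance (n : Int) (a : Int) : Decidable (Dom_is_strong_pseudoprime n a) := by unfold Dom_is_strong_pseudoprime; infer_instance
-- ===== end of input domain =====

-- B replaces A's O(n) trial division over all of [2,n) by trial division up to sqrt(n),
-- and replaces one modular pow per witness round by a single repeated-squaring pass (objective: faster).


-- the identical `while t % 2 == 0: t //= 2; s += 1` loop of both Pythons (called with t = n-1 ≥ 3);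
-- the extra `t ≠ 0` conjunct only makes the definition total (Python would diverge at t = 0, never reached)
def pvHalve (t : Nat) : Nat × Nat :=
  if h : t % 2 = 0 ∧ t ≠ 0 then
    let p := pvHalve (t / 2)
    (p.1, p.2 + 1)
  else (t, 0)
termination_by t
decreasing_by omega

-- ===== PORT A =====
-- `len([i for i in range(2,n) if n % i == 0]) == 0`
def is_prime (n : Int) : Bool :=
  if ((PySem.List.pyRange 2 n 1).filter (fun i => PySem.Int.mod n i == 0)).length = 0 then true else false

-- `for r in range(s): if pow(a, t*2**r, n) == n - 1: return True` (early-return loop over the range list)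
def pvALoop (n : Int) (a : Int) (t : Nat) : List Int → Bool
  | [] => false
  | r :: rs => if PySem.Int.powMod a (t * 2 ^ r.toNat) n == n - 1 then true else pvALoop n a t rs

def is_strong_pseudoprime (n : Int) (a : Int) : Bool :=
  if n < 2 then false
  else if is_prime n then false
  else
    let ts := pvHalve (n - 1).toNat
    if PySem.Int.powMod a ts.1 n == 1 then true
    else pvALoop n a ts.1 (PySem.List.pyRange 0 (ts.2 : Int) 1)

-- ===== PORT B =====
-- `while i * i <= n: if n % i == 0: return False; i += 1` (values are nonnegative here, carried as Nat)
def pvTrialLoop (m : Nat) (i : Nat) : Bool :=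
  if _h : i * i ≤ m then
    if m % i = 0 then false else pvTrialLoop m (i + 1)
  else true
termination_by m + 1 - i
decreasing_by
  rcases Nat.eq_zero_or_pos i with h0 | h0
  · omega
  · have := Nat.le_mul_of_pos_left i h0; omega

def is_prime_alt (n : Int) : Bool :=
  if n < 2 then false else pvTrialLoop n.toNat 2

-- `for _ in range(s): if x == n - 1: return True; x = x * x % n`
def pvBLoop (n : Int) : Nat → Int → Bool
  | 0, _ => false
  | s + 1, x => if x == n - 1 then true else pvBLoop n s (PySem.Int.mod (x * x) n)

def is_strong_pseudoprime_alt (n : Int) (a : Int) : Bool :=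
  if n < 2 then false
  else if is_prime_alt n then false
  else
    let ts := pvHalve (n - 1).toNat
    let x := PySem.Int.powMod a ts.1 n
    if x == 1 then true
    else pvBLoop n ts.2 x

-- ===== PRECONDITION & SPEC =====
def Spec_is_strong_pseudoprime (n : Int) (a : Int) (out : Bool) : Prop := out = is_strong_pseudoprime_alt n a
instance (n : Int) (a : Int) (out : Bool) : Decidable (Spec_is_strong_pseudoprime n a out) := by unfold Spec_is_strong_pseudoprime; infer_instance

-- ===== CLAIM (what is proved, stated in full; the proofs are below) =====
def Claim_equal_is_strong_pseudoprime : Prop := ∀ (n : Int) (a : Int), Dom_is_strong_pseudoprime n a → Spec_is_strong_pseudoprime n a (is_strong_pseudoprime n a)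

-- ===== LEMMAS AND PROOFS =====

-- A's primality scan is "no divisor in [2,n)"
theorem is_prime_iff (n : Int) :
    is_prime n = true ↔ ∀ i : Int, 2 ≤ i → i < n → ¬ (i ∣ n) := by
  unfold is_prime
  simp only [List.length_eq_zero_iff, List.filter_eq_nil_iff, beq_iff_eq]
  constructor
  · intro h
    split at h
    · rename_i h0
      intro i h2 hlt hdvd
      exact h0 i (PySem.List.mem_pyRange_one.mpr ⟨h2, hlt⟩) ((PySem.Int.mod_eq_zero_iff_dvd n i).mpr hdvd)
    · exact absurd h (by simp)
  · intro h
    rw [if_pos]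
    intro i hi hm
    have := PySem.List.mem_pyRange_one.mp hi
    exact h i this.1 this.2 ((PySem.Int.mod_eq_zero_iff_dvd n i).mp hm)

-- B's trial loop is "no divisor j ≥ i with j*j ≤ m"
theorem pvTrialLoop_iff (m : Nat) : ∀ i : Nat, 1 ≤ i →
    (pvTrialLoop m i = true ↔ ∀ j : Nat, i ≤ j → j * j ≤ m → ¬ (j ∣ m)) := by
  suffices h : ∀ k i, m + 1 - i ≤ k → 1 ≤ i →
      (pvTrialLoop m i = true ↔ ∀ j : Nat, i ≤ j → j * j ≤ m → ¬ (j ∣ m)) from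
    fun i hi => h (m + 1) i (by omega) hi
  intro k
  induction k with
  | zero =>
    intro i hle hi
    have him : m < i := by omega
    rw [pvTrialLoop, dif_neg (by have := Nat.le_mul_of_pos_left i (by omega : 0 < i); omega)]
    refine iff_of_true rfl ?_
    intro j hij hjj
    have := Nat.le_mul_of_pos_left j (by omega : 0 < j)
    omega
  | succ k ih =>
    intro i hle hi
    rw [pvTrialLoop]
    split
    · rename_i hsq
      have him : i ≤ m := le_trans (Nat.le_mul_of_pos_left i (by omega)) hsq
      split
      · rename_i hdvd
        refine iff_of_false (by simp) ?_
        intro h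
        exact h i le_rfl hsq (Nat.dvd_iff_mod_eq_zero.mpr hdvd)
      · rename_i hnd
        rw [ih (i + 1) (by omega) (by omega)]
        constructor
        · intro h j hij hjj
          rcases Nat.eq_or_lt_of_le hij with rfl | hlt
          · exact fun hd => hnd (Nat.dvd_iff_mod_eq_zero.mp hd)
          · exact h j hlt hjj
        · intro h j hij hjj; exact h j (by omega) hjj
    · rename_i hgt
      refine iff_of_true rfl ?_
      intro j hij hjj
      exact absurd (le_trans (Nat.mul_le_mul hij hij) hjj) hgt

-- for n ≥ 2 the two primality tests agree (both decide Nat.Prime n.toNat)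
theorem prime_eq (n : Int) (hn : 2 ≤ n) : is_prime n = is_prime_alt n := by
  set m := n.toNat with hm
  have hnm : n = (m : Int) := by omega
  have hm2 : 2 ≤ m := by omega
  have hA : is_prime n = true ↔ Nat.Prime m := by
    rw [is_prime_iff, Nat.prime_def_lt']
    constructor
    · intro h
      refine ⟨hm2, fun j h2 hlt hdvd => ?_⟩
      exact h (j : Int) (by exact_mod_cast h2) (by omega) (by rw [hnm]; exact_mod_cast hdvd)
    · intro h i h2 hlt hdvd
      have h2' : 2 ≤ i.toNat := by omega
      have hlt' : i.toNat < m := by omega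
      refine h.2 i.toNat h2' hlt' ?_
      have : (i.toNat : Int) ∣ (m : Int) := by
        rw [← hnm]; convert hdvd using 1; omega
      exact_mod_cast this
  have hB : is_prime_alt n = true ↔ Nat.Prime m := by
    unfold is_prime_alt
    rw [if_neg (by omega), ← hm, pvTrialLoop_iff m 2 (by omega)]
    rw [Nat.prime_def_le_sqrt]
    constructor
    · intro h
      refine ⟨hm2, fun j h2 hle hdvd => ?_⟩
      exact h j h2 (Nat.le_sqrt.mp hle) hdvd
    · intro h j h2 hjj hdvd
      exact h.2 j h2 (Nat.le_sqrt.mpr hjj) hdvd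
  exact Bool.eq_iff_iff.mpr (hA.trans hB.symm)

-- A's loop over range(s): some r < s has a^(t·2^r) % n = n-1
theorem pvALoop_iff (n a : Int) (t : Nat) (hn : 0 < n) (s : Nat) :
    (pvALoop n a t (PySem.List.pyRange 0 (s : Int) 1) = true)
      ↔ ∃ k < s, a ^ (t * 2 ^ k) % n = n - 1 := by
  have gen : ∀ rs : List Int, (pvALoop n a t rs = true) ↔
      ∃ r ∈ rs, PySem.Int.powMod a (t * 2 ^ r.toNat) n = n - 1 := by
    intro rs
    induction rs with
    | nil => simp [pvALoop]
    | cons r rs ih =>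
      rw [pvALoop]
      split
      · rename_i h; simp only [true_iff]; exact ⟨r, List.mem_cons_self, by simpa using h⟩
      · rename_i h
        rw [ih]
        constructor
        · rintro ⟨x, hx, hh⟩; exact ⟨x, List.mem_cons_of_mem _ hx, hh⟩
        · rintro ⟨x, hx, hh⟩
          rcases List.mem_cons.mp hx with rfl | hx'
          · exact absurd hh (by simpa using h)
          · exact ⟨x, hx', hh⟩
  rw [gen]
  constructor
  · rintro ⟨r, hr, hh⟩
    have := PySem.List.mem_pyRange_one.mp hr
    refine ⟨r.toNat, by omega, ?_⟩
    rw [← PySem.Int.mod_eq_emod_of_pos hn]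
    exact hh
  · rintro ⟨k, hk, hh⟩
    refine ⟨(k : Int), PySem.List.mem_pyRange_one.mpr ⟨by omega, by omega⟩, ?_⟩
    show PySem.Int.mod (a ^ (t * 2 ^ (k : Int).toNat)) n = n - 1
    rw [PySem.Int.mod_eq_emod_of_pos hn]
    simpa using hh

-- B's squaring loop, started at a^e % n, finds the same witnesses
theorem pvBLoop_iff (n a : Int) (hn : 0 < n) :
    ∀ (s : Nat) (e : Nat), (pvBLoop n s (a ^ e % n) = true)
      ↔ ∃ k < s, a ^ (e * 2 ^ k) % n = n - 1 := by
  intro s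
  induction s with
  | zero => intro e; simp [pvBLoop]
  | succ s ih =>
    intro e
    rw [pvBLoop]
    have hsq : PySem.Int.mod ((a ^ e % n) * (a ^ e % n)) n = a ^ (e * 2) % n := by
      rw [PySem.Int.mod_eq_emod_of_pos hn, ← Int.mul_emod, ← pow_add]
      ring_nf
    split
    · rename_i h
      simp only [true_iff]
      exact ⟨0, by omega, by simpa using (beq_iff_eq.mp (by simpa using h))⟩
    · rename_i h
      rw [hsq, ih (e * 2)]
      constructor
      · rintro ⟨k, hk, hh⟩
        exact ⟨k + 1, by omega, by rw [pow_succ]; convert hh using 3; ring⟩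
      · rintro ⟨k, hk, hh⟩
        match k with
        | 0 => exact absurd (by simpa using hh) (by simpa using h)
        | k + 1 =>
          exact ⟨k, by omega, by rw [← hh]; congr 1; rw [pow_succ]; ring⟩

-- ===== VERDICT (by name: the statement is the Claim_ definition above) =====
theorem is_strong_pseudoprime_spec : Claim_equal_is_strong_pseudoprime := by
  intro n a _
  unfold Spec_is_strong_pseudoprime is_strong_pseudoprime is_strong_pseudoprime_alt
  by_cases h2 : n < 2
  · simp [h2]
  · rw [if_neg h2, if_neg h2, prime_eq n (by omega)]
    by_cases hp : is_prime_alt n = true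
    · simp [hp]
    · rw [if_neg hp, if_neg hp]
      have hn : 0 < n := by omega
      set ts := pvHalve (n - 1).toNat with hts
      by_cases h1 : PySem.Int.powMod a ts.1 n == 1
      · simp [h1]
      · rw [if_neg h1]
        simp only
        rw [if_neg (by simpa using h1)]
        have hx : PySem.Int.powMod a ts.1 n = a ^ ts.1 % n := by
          unfold PySem.Int.powMod
          exact PySem.Int.mod_eq_emod_of_pos hn
        rw [hx]
        exact Bool.eq_iff_iff.mpr ((pvALoop_iff n a ts.1 hn ts.2).trans (pvBLoop_iff n a hn ts.2 ts.1).symm)
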